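-- pv_equiv track=rewrite | github.com/JaviCC19/Lab3Teoria | Lab3.py | expand_regex
-- ===== SOURCE A (Python) =====
-- def expand_regex(regex):
--     result = ''
--     i = 0
--     while i < len(regex):
--         c = regex[i]
--
--         if i + 1 < len(regex) and regex[i + 1] in {'+', '?'}:
--             op = regex[i + 1]
--
--             # Si el carácter es un grupo cerrado con ')', buscar el grupo completo
--             if c == ')':
--                 # Buscar el paréntesis que abre este grupo
--                 j = i
--                 count = 0
--                 while j >= 0:
--                     if regex[j] == ')':
--                         count += 1
--                     elif regex[j] == '(':
--                         count -= 1
--                         if count == 0: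
--                             break
--                     j -= 1
--                 group = regex[j:i+1]  # extraer grupo completo
--                 if op == '+':
--                     result += f"{group}.{group}*"
--                 else:  # op == '?'
--                     result += f"{group}|ε"
--             else:
--                 # Es una sola letra o símbolo
--                 if op == '+':
--                     result += f"{c}.{c}*"
--                 else:  # op == '?'
--                     result += f"{c}|ε"
--             i += 2
--         else:
--             result += c
--             i += 1
--     return result
-- ===== SOURCE B (Python) =====
-- def expand_regex(regex):
--     n = len(regex)
--     pieces = []
--     stack = []  # indices of currently-unmatched '('
--     i = 0
--     while i < n:
--         c = regex[i]
--         start = None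
--         if c == '(':
--             stack.append(i)
--         elif c == ')':
--             start = stack.pop() if stack else None
--         op = regex[i + 1] if i + 1 < n else ''
--         if op == '+' or op == '?':
--             if c == ')':
--                 group = regex[start:i + 1] if start is not None else ''
--             else:
--                 group = c
--             pieces.append(group + '.' + group + '*' if op == '+' else group + '|ε')
--             i += 2
--         else:
--             pieces.append(c)
--             i += 1
--     return ''.join(pieces)
-- ===== Notes on version B (the rewrite author's own statement) =====
-- stated objective: faster
-- what changed: A re-scans backwards with a paren counter for every '(...)group' followed by +/? (quadratic); B makes one forward pass that maintains a stack of unmatched '(' indices, so each group's start is an O(1) stack lookup, and joins pieces at the end.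
import Mathlib
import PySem

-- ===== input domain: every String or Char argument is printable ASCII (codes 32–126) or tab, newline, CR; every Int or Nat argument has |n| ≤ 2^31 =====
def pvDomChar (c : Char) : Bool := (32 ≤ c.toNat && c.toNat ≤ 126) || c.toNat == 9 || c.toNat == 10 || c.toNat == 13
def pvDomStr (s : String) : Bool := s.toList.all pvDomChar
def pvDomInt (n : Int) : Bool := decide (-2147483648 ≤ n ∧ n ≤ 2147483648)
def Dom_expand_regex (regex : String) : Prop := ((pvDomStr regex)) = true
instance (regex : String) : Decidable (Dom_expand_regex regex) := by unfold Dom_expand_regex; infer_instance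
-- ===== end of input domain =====

-- B replaces A's quadratic backward re-scan for each '(…)' group by a single forward pass
-- maintaining a stack of unmatched '(' indices (O(1) group lookup); same output everywhere.

-- ===== PORT A =====
-- A's inner `while j >= 0` backward scan: count of ')' minus '(' seen; breaks at the '(' where it hits 0.
def backA (cs : List Char) : Nat → Int → Int → Int
  | 0, j, _ => j
  | fuel + 1, j, count =>
    if 0 ≤ j then
      if cs.getD j.toNat ' ' = ')' then backA cs fuel (j - 1) (count + 1)
      else if cs.getD j.toNat ' ' = '(' then
        if count - 1 = 0 then j
        else backA cs fuel (j - 1) (count - 1)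
      else backA cs fuel (j - 1) count
    else j

def loopA (cs : List Char) (n : Nat) : Nat → Nat → List Char → List Char
  | 0, _, acc => acc
  | fuel + 1, i, acc =>
    if i < n then
      if i + 1 < n ∧ (cs.getD (i + 1) ' ' = '+' ∨ cs.getD (i + 1) ' ' = '?') then
        if cs.getD i ' ' = ')' then
          if cs.getD (i + 1) ' ' = '+' then
            loopA cs n fuel (i + 2) (acc ++ PySem.List.slice cs (some (backA cs (i + 1) (i : Int) 0)) (some ((i : Int) + 1))
              ++ ['.'] ++ PySem.List.slice cs (some (backA cs (i + 1) (i : Int) 0)) (some ((i : Int) + 1)) ++ ['*'])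
          else
            loopA cs n fuel (i + 2) (acc ++ PySem.List.slice cs (some (backA cs (i + 1) (i : Int) 0)) (some ((i : Int) + 1)) ++ ['|', 'ε'])
        else
          if cs.getD (i + 1) ' ' = '+' then
            loopA cs n fuel (i + 2) (acc ++ [cs.getD i ' ', '.', cs.getD i ' ', '*'])
          else
            loopA cs n fuel (i + 2) (acc ++ [cs.getD i ' ', '|', 'ε'])
      else loopA cs n fuel (i + 1) (acc ++ [cs.getD i ' '])
    else acc

def expand_regex (regex : String) : String :=
  String.ofList (loopA regex.toList regex.toList.length regex.toList.length 0 [])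

-- ===== PORT B =====
-- the expanded group at a ')' (or the single character): O(1) via the stack top
def groupB (cs : List Char) (i : Nat) (stack : List Nat) : List Char :=
  if cs.getD i ' ' = ')' then
    match stack.head? with
    | some s => PySem.List.slice cs (some (s : Int)) (some ((i : Int) + 1))
    | none => []
  else [cs.getD i ' ']

-- B's per-character stack update: push the index of '(', pop at ')' (empty stack stays empty)
def popStk (c : Char) (i : Nat) (stack : List Nat) : List Nat :=
  if c = '(' then i :: stack else if c = ')' then stack.tail else stack

def loopB (cs : List Char) (n : Nat) : Nat → Nat → List Nat → List (List Char) → List (List Char)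
  | 0, _, _, pieces => pieces
  | fuel + 1, i, stack, pieces =>
    if i < n then
      if i + 1 < n ∧ (cs.getD (i + 1) ' ' = '+' ∨ cs.getD (i + 1) ' ' = '?') then
        if cs.getD (i + 1) ' ' = '+' then
          loopB cs n fuel (i + 2) (popStk (cs.getD i ' ') i stack)
            (pieces ++ [groupB cs i stack ++ ['.'] ++ groupB cs i stack ++ ['*']])
        else
          loopB cs n fuel (i + 2) (popStk (cs.getD i ' ') i stack)
            (pieces ++ [groupB cs i stack ++ ['|', 'ε']])
      else loopB cs n fuel (i + 1) (popStk (cs.getD i ' ') i stack) (pieces ++ [[cs.getD i ' ']])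
    else pieces

def expand_regex_alt (regex : String) : String :=
  String.ofList (loopB regex.toList regex.toList.length regex.toList.length 0 [] []).flatten

-- ===== PRECONDITION & SPEC =====
def Spec_expand_regex (regex : String) (out : String) : Prop := out = expand_regex_alt regex
instance (regex : String) (out : String) : Decidable (Spec_expand_regex regex out) := by unfold Spec_expand_regex; infer_instance

-- ===== CLAIM (what is proved, stated in full; the proofs are below) =====
def Claim_equal_expand_regex : Prop := ∀ (regex : String), Dom_expand_regex regex → Spec_expand_regex regex (expand_regex regex)

-- ===== LEMMAS AND PROOFS =====

-- the stack of unmatched '(' indices after scanning the first k characters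
def stk (cs : List Char) : Nat → List Nat
  | 0 => []
  | k + 1 =>
    let s := stk cs k
    let c := cs.getD k ' '
    if c = '(' then k :: s else if c = ')' then s.tail else s

def idxVal (s : List Nat) (c : Nat) : Int :=
  match s[c]? with
  | some v => (v : Int)
  | none => -1

theorem idxVal_tail (s : List Nat) (c : Nat) : idxVal s.tail c = idxVal s (c + 1) := by
  cases s <;> simp [idxVal]

theorem backA_eq_stk (cs : List Char) (k c : Nat) :
    backA cs k ((k : Int) - 1) ((c : Int) + 1) = idxVal (stk cs k) c := by
  induction k generalizing c with
  | zero => simp [backA, stk, idxVal]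
  | succ k ih =>
    rw [backA]
    have h1e : cs.getD k ' ' = cs[k]?.getD ' ' := rfl
    have hk : (0 : Int) ≤ (k + 1 : Nat) - 1 := by push_cast; omega
    have ht : ((((k : Nat) + 1 : Nat) : Int) - 1).toNat = k := by push_cast; omega
    simp only [if_pos hk, ht]
    by_cases h1 : cs.getD k ' ' = ')'
    · rw [if_pos h1]
      have : backA cs k (((k + 1 : Nat) : Int) - 1 - 1) ((c : Int) + 1 + 1)
          = backA cs k ((k : Int) - 1) (((c + 1 : Nat) : Int) + 1) := by
        congr 1 <;> push_cast <;> omega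
      rw [this, ih (c + 1), stk]
      simp [List.getD, (h1e ▸ h1), idxVal_tail]
    · by_cases h2 : cs.getD k ' ' = '('
      · rw [if_neg h1, if_pos h2]
        by_cases hc : c = 0
        · subst hc
          have h0 : ((0 : Nat) : Int) + 1 - 1 = 0 := by norm_num
          rw [if_pos h0, stk]
          simp [List.getD, (h1e ▸ h2), idxVal]
        · have hne : ¬((c : Int) + 1 - 1 = 0) := by omega
          rw [if_neg hne]
          obtain ⟨c', rfl⟩ : ∃ c', c = c' + 1 := ⟨c - 1, by omega⟩
          have : backA cs k (((k + 1 : Nat) : Int) - 1 - 1) ((((c' + 1 : Nat)) : Int) + 1 - 1)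
              = backA cs k ((k : Int) - 1) ((c' : Int) + 1) := by
            congr 1 <;> push_cast <;> omega
          rw [this, ih c', stk]
          simp [List.getD, (h1e ▸ h2), idxVal]
      · rw [if_neg h1, if_neg h2]
        have : backA cs k (((k + 1 : Nat) : Int) - 1 - 1) ((c : Int) + 1)
            = backA cs k ((k : Int) - 1) ((c : Int) + 1) := by
          congr 1; push_cast; omega
        rw [this, ih c, stk]
        simp [List.getD, (h1e ▸ h1), (h1e ▸ h2)]

theorem slice_neg_one_empty (cs : List Char) (i : Nat) (h : i + 1 < cs.length) :
    PySem.List.slice cs (some (-1)) (some ((i : Int) + 1)) = [] := by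
  have hc : (i : Int) + 1 = ((i + 1 : Nat) : Int) := by push_cast; ring
  apply List.eq_nil_of_length_eq_zero
  rw [PySem.List.length_slice, hc, PySem.List.clampIdx_natCast, PySem.List.clampIdx_neg_one]
  omega

theorem stk_succ_ne (cs : List Char) (i : Nat) (h1 : cs.getD i ' ' ≠ '(')
    (h2 : cs.getD i ' ' ≠ ')') : stk cs (i + 1) = stk cs i := by
  have he : cs.getD i ' ' = cs[i]?.getD ' ' := rfl
  rw [stk]; simp [(he ▸ h1), (he ▸ h2)]

theorem flatten_app (acc : List (List Char)) (p : List Char) :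
    (acc ++ [p]).flatten = acc.flatten ++ p := by simp

theorem backA_at_close (cs : List Char) (i : Nat) (hc : cs.getD i ' ' = ')') :
    backA cs (i + 1) (i : Int) 0 = idxVal (stk cs i) 0 := by
  rw [backA]
  have h0 : (0 : Int) ≤ (i : Int) := by positivity
  have ht : ((i : Int)).toNat = i := by omega
  simp only [if_pos h0, ht]
  rw [if_pos hc]
  have he : backA cs i ((i : Int) - 1) (0 + 1) = backA cs i ((i : Int) - 1) (((0 : Nat) : Int) + 1) := by
    norm_num
  rw [he, backA_eq_stk]

theorem stk_close (cs : List Char) (i : Nat) (hc : cs.getD i ' ' = ')') :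
    stk cs (i + 1) = (stk cs i).tail := by
  have he : cs.getD i ' ' = cs[i]?.getD ' ' := rfl
  rw [stk]; simp [(he ▸ hc)]

theorem stk_open (cs : List Char) (i : Nat) (hc : cs.getD i ' ' = '(') :
    stk cs (i + 1) = i :: stk cs i := by
  have he : cs.getD i ' ' = cs[i]?.getD ' ' := rfl
  rw [stk]; simp [(he ▸ hc)]

theorem stk_popStk (cs : List Char) (i : Nat) :
    stk cs (i + 1) = popStk (cs.getD i ' ') i (stk cs i) := by
  by_cases h1 : cs.getD i ' ' = '('
  · rw [stk_open cs i h1, popStk, if_pos h1]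
  · by_cases h2 : cs.getD i ' ' = ')'
    · rw [stk_close cs i h2, popStk, if_neg h1, if_pos h2]
    · rw [stk_succ_ne cs i h1 h2, popStk, if_neg h1, if_neg h2]

theorem groupB_eq (cs : List Char) (i : Nat) (hlt : i + 1 < cs.length)
    (hc : cs.getD i ' ' = ')') :
    PySem.List.slice cs (some (backA cs (i + 1) (i : Int) 0)) (some ((i : Int) + 1))
      = groupB cs i (stk cs i) := by
  rw [backA_at_close cs i hc, groupB, if_pos hc]
  cases hstk : stk cs i with
  | nil => simp [idxVal, slice_neg_one_empty cs i hlt]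
  | cons s rest => simp [idxVal]

theorem loop_eq (cs : List Char) (m : Nat) : ∀ (i : Nat) (acc : List (List Char)),
    cs.length - i ≤ m →
    loopA cs cs.length m i acc.flatten = (loopB cs cs.length m i (stk cs i) acc).flatten := by
  induction m with
  | zero => intro i acc hm; simp [loopA, loopB]
  | succ m ih =>
    intro i acc hm
    by_cases h : i < cs.length
    · rw [loopA, loopB, if_pos h, if_pos h]
      by_cases hop : i + 1 < cs.length ∧ (cs.getD (i + 1) ' ' = '+' ∨ cs.getD (i + 1) ' ' = '?')
      · rw [if_pos hop, if_pos hop]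
        have hst2 : stk cs (i + 2) = popStk (cs.getD i ' ') i (stk cs i) := by
          have hne1 : cs.getD (i + 1) ' ' ≠ '(' := by rcases hop.2 with h' | h' <;> rw [h'] <;> decide
          have hne2 : cs.getD (i + 1) ' ' ≠ ')' := by rcases hop.2 with h' | h' <;> rw [h'] <;> decide
          have : stk cs (i + 1 + 1) = stk cs (i + 1) := stk_succ_ne cs (i + 1) hne1 hne2
          rw [show i + 2 = i + 1 + 1 from rfl, this, stk_popStk]
        have hrec2 : cs.length - (i + 2) ≤ m := by omega
        by_cases hcl : cs.getD i ' ' = ')'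
        · rw [if_pos hcl]
          rw [groupB_eq cs i hop.1 hcl]
          by_cases hplus : cs.getD (i + 1) ' ' = '+'
          · rw [if_pos hplus, if_pos hplus]
            have := ih (i + 2) (acc ++ [groupB cs i (stk cs i) ++ ['.'] ++ groupB cs i (stk cs i) ++ ['*']]) hrec2
            rw [flatten_app] at this
            rw [hst2] at this
            simpa using this
          · rw [if_neg hplus, if_neg hplus]
            have := ih (i + 2) (acc ++ [groupB cs i (stk cs i) ++ ['|', 'ε']]) hrec2
            rw [flatten_app] at this
            rw [hst2] at this
            simpa using this
        · rw [if_neg hcl]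
          have hgb : groupB cs i (stk cs i) = [cs.getD i ' '] := by rw [groupB, if_neg hcl]
          rw [hgb]
          by_cases hplus : cs.getD (i + 1) ' ' = '+'
          · rw [if_pos hplus, if_pos hplus]
            have := ih (i + 2) (acc ++ [[cs.getD i ' '] ++ ['.'] ++ [cs.getD i ' '] ++ ['*']]) hrec2
            rw [flatten_app] at this
            rw [hst2] at this
            simpa using this
          · rw [if_neg hplus, if_neg hplus]
            have := ih (i + 2) (acc ++ [[cs.getD i ' '] ++ ['|', 'ε']]) hrec2
            rw [flatten_app] at this
            rw [hst2] at this
            simpa using this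
      · rw [if_neg hop, if_neg hop]
        have hrec1 : cs.length - (i + 1) ≤ m := by omega
        have := ih (i + 1) (acc ++ [[cs.getD i ' ']]) hrec1
        rw [flatten_app] at this
        rw [stk_popStk] at this
        simpa using this
    · rw [loopA, loopB, if_neg h, if_neg h]

-- ===== VERDICT (by name: the statement is the Claim_ definition above) =====
theorem expand_regex_spec : Claim_equal_expand_regex := by
  intro regex _
  unfold Spec_expand_regex expand_regex expand_regex_alt
  have := loop_eq regex.toList regex.toList.length 0 [] (by omega)
  simpa [stk] using congrArg String.ofList this
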